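-- pv_equiv track=rewrite | github.com/minvws/gfmodules-mcsd-update-client | services/iti-90/main.py | _normalize_relative_ref
-- ===== SOURCE A (Python) =====
-- from typing import Dict, Any, List, Optional, Tuple, Literal
--
-- def _normalize_relative_ref(ref: Optional[str]) -> str:
--     """Normalize a FHIR relative reference (ResourceType/id).
--
--     - Handles full URLs by extracting the last two path segments
--     - Returns empty string for empty/None input
--     """
--     if not ref:
--         return ""
--     r = str(ref).strip()
--     if not r:
--         return ""
--     # If a full URL is provided, keep only the last two path segments (ResourceType/id)
--     parts = [p for p in r.split("/") if p]
--     if len(parts) >= 2: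
--         return parts[-2] + "/" + parts[-1]
--     return r
-- ===== SOURCE B (Python) =====
-- from typing import Optional
--
-- def _normalize_relative_ref(ref: Optional[str]) -> str:
--     """Normalize a FHIR relative reference (ResourceType/id).
--
--     One forward pass keeping only the last two non-empty '/'-segments
--     (no intermediate list of all segments).
--     """
--     if not ref:
--         return ""
--     r = str(ref).strip()
--     if not r:
--         return ""
--     prev = None   # second-to-last non-empty segment seen so far
--     last = None   # last non-empty segment seen so far
--     cur = ""
--     for ch in r + "/":   # trailing '/' flushes the final segment
--         if ch == "/":
--             if cur:
--                 prev, last = last, cur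
--                 cur = ""
--         else:
--             cur = cur + ch
--     if prev is not None:
--         return prev + "/" + last
--     return r
-- ===== Notes on version B (the rewrite author's own statement) =====
-- stated objective: alternative
-- what changed: Replaced split-into-list + filter + negative indexing by a single forward character scan that maintains only the current segment and the last two non-empty segments in O(1) extra state.
import Mathlib
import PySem

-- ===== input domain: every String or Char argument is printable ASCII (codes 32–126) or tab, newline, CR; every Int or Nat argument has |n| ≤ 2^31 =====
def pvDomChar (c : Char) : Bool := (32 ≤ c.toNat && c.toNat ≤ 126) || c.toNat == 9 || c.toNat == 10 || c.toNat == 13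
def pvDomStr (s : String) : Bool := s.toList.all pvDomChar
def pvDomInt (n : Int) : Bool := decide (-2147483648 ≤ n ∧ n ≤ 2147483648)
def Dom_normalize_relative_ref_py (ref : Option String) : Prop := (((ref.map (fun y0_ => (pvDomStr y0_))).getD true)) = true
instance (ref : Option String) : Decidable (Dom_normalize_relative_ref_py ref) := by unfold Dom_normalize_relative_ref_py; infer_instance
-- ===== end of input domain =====

-- B replaces split-into-list + filter + negative indexing by a single forward
-- character scan that keeps only the last two non-empty segments (alternative decomposition).


-- ===== PORT A =====
-- 'if not ref' is true for None and for ""; str(ref) is the identity on a str.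
def normalize_relative_ref_py (ref : Option String) : String :=
  match ref with
  | none => ""
  | some s =>
    if s = "" then ""
    else
      let r := PySem.Chars.strip s.toList
      if r = [] then ""
      else
        let parts := (PySem.Chars.splitOn r ['/']).filter (fun p => !p.isEmpty)
        if 2 ≤ parts.length then
          String.ofList (PySem.List.pyGetD parts (-2) [] ++ '/' :: PySem.List.pyGetD parts (-1) [])
        else String.ofList r

-- ===== PORT B =====
-- Loop body of Source B: state (cur, prev, last); '/' flushes cur into (prev, last).
def pvAltStep (st : List Char × Option (List Char) × Option (List Char)) (ch : Char) :
    List Char × Option (List Char) × Option (List Char) :=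
  match st with
  | (cur, prev, last) =>
    if ch = '/' then
      if cur ≠ [] then ([], last, some cur) else (cur, prev, last)
    else (cur ++ [ch], prev, last)

-- In Source B 'prev is not None' implies 'last is not None' (prev is only ever set from a set
-- last), so the (some, none) state is unreachable; the catch-all arm returns r like Source B's tail.
def normalize_relative_ref_py_alt (ref : Option String) : String :=
  match ref with
  | none => ""
  | some s =>
    if s = "" then ""
    else
      let r := PySem.Chars.strip s.toList
      if r = [] then ""
      else
        let st := (r ++ ['/']).foldl pvAltStep ([], none, none)
        match st.2.1, st.2.2 with
        | some p, some l => String.ofList (p ++ '/' :: l)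
        | _, _ => String.ofList r

-- ===== PRECONDITION & SPEC =====
def Spec_normalize_relative_ref_py (ref : Option String) (out : String) : Prop := out = normalize_relative_ref_py_alt ref
instance (ref : Option String) (out : String) : Decidable (Spec_normalize_relative_ref_py ref out) := by unfold Spec_normalize_relative_ref_py; infer_instance

-- ===== CLAIM (what is proved, stated in full; the proofs are below) =====
def Claim_equal_normalize_relative_ref_py : Prop := ∀ (ref : Option String), Dom_normalize_relative_ref_py ref → Spec_normalize_relative_ref_py ref (normalize_relative_ref_py ref)

-- ===== LEMMAS AND PROOFS =====

-- Structural form of Python's str.split('/') (forward accumulator).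
def pvSplitFrom : List Char → List Char → List (List Char)
  | cur, [] => [cur]
  | cur, c :: rest => if c = '/' then cur :: pvSplitFrom [] rest else pvSplitFrom (cur ++ [c]) rest

-- The non-empty segments of cur ++ l (cur contains no '/').
def pvSegs : List Char → List Char → List (List Char)
  | cur, [] => if cur = [] then [] else [cur]
  | cur, c :: rest =>
    if c = '/' then (if cur = [] then pvSegs [] rest else cur :: pvSegs [] rest)
    else pvSegs (cur ++ [c]) rest

theorem pv_splitOn_go_spec (l : List Char) : ∀ (fuel : Nat) (cur : List Char) (acc : List (List Char)),
    l.length ≤ fuel →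
    PySem.Chars.splitOn.go ['/'] fuel l cur acc = acc.reverse ++ pvSplitFrom cur.reverse l := by
  induction l with
  | nil =>
    intro fuel cur acc _
    cases fuel <;> simp [PySem.Chars.splitOn.go, pvSplitFrom]
  | cons c rest ih =>
    intro fuel cur acc hf
    cases fuel with
    | zero => simp at hf
    | succ fuel =>
      by_cases hc : c = '/'
      · subst hc
        have hpre : List.isPrefixOf ['/'] ('/' :: rest) = true := by
          simp [List.isPrefixOf]
        rw [PySem.Chars.splitOn.go]
        simp only [hpre, if_true, List.length_singleton, List.drop_succ_cons, List.drop_zero]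
        rw [ih fuel [] (cur.reverse :: acc) (by simp at hf ⊢; omega)]
        simp [pvSplitFrom]
      · have hpre : List.isPrefixOf ['/'] (c :: rest) = false := by
          simp only [List.isPrefixOf, Bool.and_true, beq_eq_false_iff_ne, ne_eq]
          exact fun h => hc h.symm
        rw [PySem.Chars.splitOn.go]
        simp only [hpre, Bool.false_eq_true, if_false]
        rw [ih fuel (c :: cur) acc (by simp at hf ⊢; omega)]
        simp [pvSplitFrom, hc]

theorem pv_splitOn_eq (r : List Char) :
    PySem.Chars.splitOn r ['/'] = pvSplitFrom [] r := by
  unfold PySem.Chars.splitOn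
  rw [pv_splitOn_go_spec r (r.length + 1) [] [] (by omega)]
  simp

theorem pv_filter_splitFrom : ∀ (l cur : List Char),
    (pvSplitFrom cur l).filter (fun p => !p.isEmpty) = pvSegs cur l := by
  intro l
  induction l with
  | nil => intro cur; by_cases h : cur = [] <;> simp [pvSplitFrom, pvSegs, h]
  | cons c rest ih =>
    intro cur
    by_cases hc : c = '/'
    · subst hc
      by_cases h : cur = [] <;> simp [pvSplitFrom, pvSegs, h, ih]
    · simp [pvSplitFrom, pvSegs, hc, ih]

-- B's fold computes the last two elements of pvSegs.
theorem pv_foldB : ∀ (l cur : List Char) (prev last : Option (List Char)),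
    (l ++ ['/']).foldl pvAltStep (cur, prev, last) =
      ([], (pvSegs cur l).foldl (fun st s => (st.2, some s)) (prev, last)) := by
  intro l
  induction l with
  | nil =>
    intro cur prev last
    by_cases h : cur = [] <;> simp [pvAltStep, pvSegs, h]
  | cons c rest ih =>
    intro cur prev last
    by_cases hc : c = '/'
    · subst hc
      by_cases h : cur = []
      · simp only [List.cons_append, List.foldl_cons, pvAltStep, h]
        simp [pvSegs, ih]
      · simp only [List.cons_append, List.foldl_cons, pvAltStep]
        simp [pvSegs, h, ih]
    · simp only [List.cons_append, List.foldl_cons, pvAltStep, hc]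
      simp [pvSegs, hc, ih]

theorem pv_push_spec (L : List (List Char)) :
    L.foldl (fun (st : Option (List Char) × Option (List Char)) s => (st.2, some s)) (none, none) =
      ((if 2 ≤ L.length then L[L.length - 2]? else none), L[L.length - 1]?) := by
  induction L using List.reverseRecOn with
  | nil => simp
  | append_singleton M x ih =>
    rw [List.foldl_append]
    simp only [List.foldl_cons, List.foldl_nil, ih, Prod.mk.injEq]
    refine ⟨?_, ?_⟩
    · cases M with
      | nil => simp
      | cons a as =>
        rw [if_pos (by simp)]
        rw [List.getElem?_append_left (by simp)]
        simp
    · simp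

-- ===== VERDICT (by name: the statement is the Claim_ definition above) =====
theorem normalize_relative_ref_py_spec : Claim_equal_normalize_relative_ref_py := by
  intro ref _
  unfold Spec_normalize_relative_ref_py
  cases ref with
  | none => rfl
  | some s =>
    unfold normalize_relative_ref_py normalize_relative_ref_py_alt
    dsimp only
    by_cases hs : s = ""
    · simp [hs]
    · rw [if_neg hs, if_neg hs]
      set r := PySem.Chars.strip s.toList with hr
      by_cases hre : r = []
      · simp [hre]
      · rw [if_neg hre, if_neg hre]
        rw [pv_splitOn_eq, pv_filter_splitFrom, pv_foldB, pv_push_spec]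
        set L := pvSegs [] r with hL
        by_cases h2 : 2 ≤ L.length
        · rw [if_pos h2]
          have e1 : L[L.length - 2]? = some L[L.length - 2] := by
            rw [List.getElem?_eq_getElem (by omega)]
          have e2 : L[L.length - 1]? = some L[L.length - 1] := by
            rw [List.getElem?_eq_getElem (by omega)]
          simp only [if_pos h2, e1, e2]
          rw [PySem.List.pyGetD_neg_ofNat L 2 [] (by omega) (by omega)]
          rw [PySem.List.pyGetD_neg_ofNat L 1 [] (by omega) (by omega)]
        · simp only [if_neg h2]
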